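-- pv_equiv track=rewrite | github.com/nkchangliu/algorithms | graph/large_cluster.py | two_distance_away
-- ===== SOURCE A (Python) =====
-- def two_distance_away(s):
--     two_away = set()
--     for i in range(len(s)):
--         for j in range(i + 1, len(s)):
--             if s[i] == "0":
--                 if s[j] == "0":
--                     new_s = s[0:i] + "1" + s[i + 1 : j] + "1" + s[j+1 : ]
--                 else:
--                     new_s = s[0:i] + "1" + s[i + 1: j] + "0" + s[j+1 :]
--             else:
--                 if s[j] == "0":
--                     new_s = s[0: i] + "0" + s[i + 1 : j] + "1" + s[j+1 : ]
--                 else: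
--                     new_s = s[0 : i] + "0" + s[i + 1 : j] + "0" + s[j+1 : ]
--             two_away.add(new_s)
--     return two_away
-- ===== SOURCE B (Python) =====
-- def two_distance_away(s):
--     def flip(c):
--         return "1" if c == "0" else "0"
--     one = [s[:i] + flip(s[i]) + s[i + 1:] for i in range(len(s))]
--     two = set()
--     for i, t in enumerate(one):
--         for j in range(len(s)):
--             if j != i:
--                 two.add(t[:j] + flip(t[j]) + t[j + 1:])
--     return two
-- ===== Notes on version B (the rewrite author's own statement) =====
-- stated objective: alternative
-- what changed: B replaces A's per-pair four-branch slice surgery per pair with a composition of two single-position flips (a precomputed distance-1 list, then one more flip at every other index j != i), relying on the set to deduplicate the two orders of each pair.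
import Mathlib
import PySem

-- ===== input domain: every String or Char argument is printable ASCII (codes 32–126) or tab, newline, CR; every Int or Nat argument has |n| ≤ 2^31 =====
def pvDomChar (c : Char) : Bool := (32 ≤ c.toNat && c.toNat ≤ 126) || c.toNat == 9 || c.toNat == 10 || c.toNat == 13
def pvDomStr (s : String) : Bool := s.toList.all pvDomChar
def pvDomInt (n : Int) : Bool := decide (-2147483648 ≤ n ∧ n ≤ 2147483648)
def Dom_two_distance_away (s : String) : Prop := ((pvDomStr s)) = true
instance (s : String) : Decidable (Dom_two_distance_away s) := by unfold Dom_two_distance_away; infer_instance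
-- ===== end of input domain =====

-- B composes two single-position flips (precomputed distance-1 list, then one more
-- flip at every other index), letting the set deduplicate the two orders of each
-- pair, instead of A's four-branch double splice per pair; alternative, same cost.

-- ===== PORT A =====
def two_distance_away (s : String) : List String :=
  let l : List Char := s.toList
  let n : Int := (l.length : Int)
  (PySem.List.pyRange 0 n 1).foldl (fun two_away i =>
    (PySem.List.pyRange (i + 1) n 1).foldl (fun two_away j =>
      let new_s : String :=
        if PySem.List.pyGetD l i ' ' = '0' then
          if PySem.List.pyGetD l j ' ' = '0' then
            String.ofList (PySem.List.slice l (some 0) (some i) ++ ['1'] ++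
              PySem.List.slice l (some (i + 1)) (some j) ++ ['1'] ++
              PySem.List.slice l (some (j + 1)) none)
          else
            String.ofList (PySem.List.slice l (some 0) (some i) ++ ['1'] ++
              PySem.List.slice l (some (i + 1)) (some j) ++ ['0'] ++
              PySem.List.slice l (some (j + 1)) none)
        else
          if PySem.List.pyGetD l j ' ' = '0' then
            String.ofList (PySem.List.slice l (some 0) (some i) ++ ['0'] ++
              PySem.List.slice l (some (i + 1)) (some j) ++ ['1'] ++
              PySem.List.slice l (some (j + 1)) none)
          else
            String.ofList (PySem.List.slice l (some 0) (some i) ++ ['0'] ++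
              PySem.List.slice l (some (i + 1)) (some j) ++ ['0'] ++
              PySem.List.slice l (some (j + 1)) none)
      PySem.Set.add two_away new_s) two_away) (PySem.Set.empty)

-- ===== PORT B =====
def pvFlip (c : Char) : Char := if c = '0' then '1' else '0'

def two_distance_away_alt (s : String) : List String :=
  let l : List Char := s.toList
  let one : List String :=
    (PySem.List.pyRange 0 (l.length : Int) 1).map (fun i =>
      String.ofList (PySem.List.slice l none (some i) ++ [pvFlip (PySem.List.pyGetD l i ' ')] ++
        PySem.List.slice l (some (i + 1)) none))
  (PySem.List.enumerate one).foldl (fun two p =>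
    (PySem.List.pyRange 0 (l.length : Int) 1).foldl (fun two j =>
      if j ≠ p.1 then
        PySem.Set.add two
          (String.ofList (PySem.List.slice p.2.toList none (some j) ++
            [pvFlip (PySem.List.pyGetD p.2.toList j ' ')] ++
            PySem.List.slice p.2.toList (some (j + 1)) none))
      else two) two) (PySem.Set.empty)

-- ===== PRECONDITION & SPEC =====
def Spec_two_distance_away (s : String) (out : List String) : Prop := out = two_distance_away_alt s
instance (s : String) (out : List String) : Decidable (Spec_two_distance_away s out) := by unfold Spec_two_distance_away; infer_instance

-- ===== CLAIM (what is proved, stated in full; the proofs are below) =====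
def Claim_equal_two_distance_away : Prop := ∀ (s : String), Dom_two_distance_away s → Spec_two_distance_away s (two_distance_away s)

-- ===== LEMMAS AND PROOFS =====

-- the canonical distance-2 string: flip positions i < j (as Nats) of l
def pvE (l : List Char) (i j : Nat) : String :=
  String.ofList ((l.set i (pvFlip (l.getD i ' '))).set j (pvFlip (l.getD j ' ')))

-- row i of A, normalized
def pvRowA (l : List Char) (i : Int) : List String :=
  (PySem.List.pyRange (i + 1) (l.length : Int) 1).map (fun j => pvE l i.toNat j.toNat)

theorem pv_foldl_add_map {α : Type} [BEq α] (f : Int → α) (js : List Int) (acc : PySem.Set α) :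
    js.foldl (fun a j => PySem.Set.add a (f j)) acc = PySem.Set.update acc (js.map f) := by
  induction js generalizing acc with
  | nil => simp [PySem.Set.update]
  | cons j js ih => simp [PySem.Set.update] at ih ⊢; rw [ih]

theorem pv_foldl_add_if {α : Type} [BEq α] (f : Int → α) (p : Int → Prop) [DecidablePred p]
    (js : List Int) (acc : PySem.Set α) :
    js.foldl (fun a j => if p j then PySem.Set.add a (f j) else a) acc
      = PySem.Set.update acc ((js.filter (fun j => decide (p j))).map f) := by
  induction js generalizing acc with
  | nil => simp [PySem.Set.update]
  | cons j js ih =>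
    by_cases h : p j <;> simp [h, PySem.Set.update] at ih ⊢ <;> rw [ih]

theorem pv_foldl_update {α β : Type} [BEq α] (g : β → List α) (rows : List β) (acc : PySem.Set α) :
    rows.foldl (fun a r => PySem.Set.update a (g r)) acc = PySem.Set.update acc (rows.flatMap g) := by
  induction rows generalizing acc with
  | nil => simp [PySem.Set.update]
  | cons r rows ih => simp [PySem.Set.update, List.foldl_append] at ih ⊢; rw [ih]

theorem pv_update_append {α : Type} [BEq α] (s : PySem.Set α) (xs ys : List α) :
    PySem.Set.update s (xs ++ ys) = PySem.Set.update (PySem.Set.update s xs) ys := by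
  simp [PySem.Set.update, List.foldl_append]

theorem pv_update_of_mem {α : Type} [BEq α] [LawfulBEq α] (s : PySem.Set α) (xs : List α)
    (h : ∀ x ∈ xs, x ∈ s) : PySem.Set.update s xs = s := by
  induction xs generalizing s with
  | nil => simp [PySem.Set.update]
  | cons x xs ih =>
    simp [PySem.Set.update] at ih ⊢
    rw [PySem.Set.add_of_mem (h x (by simp))]
    exact ih s (fun y hy => h y (by simp [hy]))

theorem pv_splice_eq_set (l : List Char) (i j : Nat) (a b : Char) (hij : i < j) (hj : j < l.length) :
    l.take i ++ a :: ((l.drop (i + 1)).take (j - (i + 1)) ++ b :: l.drop (j + 1))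
      = (l.set i a).set j b := by
  rw [List.set_comm _ _ (by omega)]
  rw [List.set_eq_take_cons_drop a (l := l.set j b) (by simp; omega)]
  rw [List.take_set, List.set_eq_of_length_le (by simp; omega)]
  rw [List.drop_set, if_neg (by omega)]
  rw [List.set_eq_take_cons_drop b (l := l.drop (i+1)) (by simp; omega)]
  rw [List.drop_drop]
  have : i + 1 + (j - (i + 1) + 1) = j + 1 := by omega
  rw [this]

theorem pv_eA_eq (l : List Char) (i j : Int) (h0 : 0 ≤ i) (hij : i < j) (hj : j < (l.length : Int)) :
    (if PySem.List.pyGetD l i ' ' = '0' then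
        if PySem.List.pyGetD l j ' ' = '0' then
          String.ofList (PySem.List.slice l (some 0) (some i) ++ ['1'] ++
            PySem.List.slice l (some (i + 1)) (some j) ++ ['1'] ++
            PySem.List.slice l (some (j + 1)) none)
        else
          String.ofList (PySem.List.slice l (some 0) (some i) ++ ['1'] ++
            PySem.List.slice l (some (i + 1)) (some j) ++ ['0'] ++
            PySem.List.slice l (some (j + 1)) none)
      else
        if PySem.List.pyGetD l j ' ' = '0' then
          String.ofList (PySem.List.slice l (some 0) (some i) ++ ['0'] ++
            PySem.List.slice l (some (i + 1)) (some j) ++ ['1'] ++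
            PySem.List.slice l (some (j + 1)) none)
        else
          String.ofList (PySem.List.slice l (some 0) (some i) ++ ['0'] ++
            PySem.List.slice l (some (i + 1)) (some j) ++ ['0'] ++
            PySem.List.slice l (some (j + 1)) none))
      = pvE l i.toNat j.toNat := by
  have hi' : i.toNat < l.length := by omega
  have hj' : j.toNat < l.length := by omega
  rw [PySem.List.pyGetD_eq_getElem l ' ' h0 (by omega),
     PySem.List.pyGetD_eq_getElem l ' ' (by omega) hj,
     PySem.List.slice_zero_start, PySem.List.slice_to l h0,
     PySem.List.slice_toNat l (by omega) (by omega),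
     PySem.List.slice_from l (by omega)]
  have e1 : (i + 1).toNat = i.toNat + 1 := by omega
  have e2 : (j + 1).toNat = j.toNat + 1 := by omega
  rw [e1, e2]
  have key : ∀ a b : Char,
      String.ofList (l.take i.toNat ++ [a] ++ (l.drop (i.toNat+1)).take (j.toNat - (i.toNat+1)) ++ [b] ++ l.drop (j.toNat+1))
        = String.ofList ((l.set i.toNat a).set j.toNat b) := by
    intro a b
    rw [← pv_splice_eq_set l i.toNat j.toNat a b (by omega) hj']
    simp
  unfold pvE pvFlip
  rw [List.getD_eq_getElem l ' ' hi', List.getD_eq_getElem l ' ' hj']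
  split_ifs <;> exact key _ _

theorem pv_splice1_eq_set (l : List Char) (i : Nat) (a : Char) (hi : i < l.length) :
    l.take i ++ a :: l.drop (i + 1) = l.set i a :=
  (List.set_eq_take_cons_drop a hi).symm

-- B's entry: flip at i then at j (i ≠ j) is pvE at the sorted pair
theorem pv_fB_eq (l : List Char) (i j : Int) (h0i : 0 ≤ i) (hi : i < (l.length : Int))
    (h0j : 0 ≤ j) (hj : j < (l.length : Int)) (hne : j ≠ i) :
    String.ofList
        (PySem.List.slice (String.ofList (PySem.List.slice l none (some i) ++
            [pvFlip (PySem.List.pyGetD l i ' ')] ++ PySem.List.slice l (some (i + 1)) none)).toList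
          none (some j) ++
         [pvFlip (PySem.List.pyGetD (String.ofList (PySem.List.slice l none (some i) ++
            [pvFlip (PySem.List.pyGetD l i ' ')] ++ PySem.List.slice l (some (i + 1)) none)).toList j ' ')] ++
         PySem.List.slice (String.ofList (PySem.List.slice l none (some i) ++
            [pvFlip (PySem.List.pyGetD l i ' ')] ++ PySem.List.slice l (some (i + 1)) none)).toList
          (some (j + 1)) none)
      = if i < j then pvE l i.toNat j.toNat else pvE l j.toNat i.toNat := by
  have hi' : i.toNat < l.length := by omega
  have hj' : j.toNat < l.length := by omega
  have ht : (String.ofList (PySem.List.slice l none (some i) ++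
      [pvFlip (PySem.List.pyGetD l i ' ')] ++ PySem.List.slice l (some (i + 1)) none)).toList
      = l.set i.toNat (pvFlip l[i.toNat]) := by
    rw [String.toList_ofList]
    rw [PySem.List.pyGetD_eq_getElem l ' ' h0i hi,
        PySem.List.slice_to l h0i, PySem.List.slice_from l (by omega)]
    have e1 : (i + 1).toNat = i.toNat + 1 := by omega
    rw [e1, List.append_assoc, List.singleton_append, pv_splice1_eq_set l i.toNat _ hi']
  rw [ht]
  rw [PySem.List.pyGetD_eq_getElem _ ' ' h0j (by simp; omega),
      PySem.List.slice_to _ h0j, PySem.List.slice_from _ (by omega)]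
  have e2 : (j + 1).toNat = j.toNat + 1 := by omega
  rw [e2, List.append_assoc, List.singleton_append,
      pv_splice1_eq_set _ j.toNat _ (by simp [hj'])]
  rw [List.getElem_set_ne (h := by omega)]
  unfold pvE
  rw [List.getD_eq_getElem l ' ' hi', List.getD_eq_getElem l ' ' hj']
  split_ifs with hlt
  · rfl
  · rw [List.set_comm _ _ (by omega)]

theorem pv_memSA (l : List Char) (r : Int) (x : String) :
    x ∈ PySem.Set.update (PySem.Set.empty) ((PySem.List.pyRange 0 r 1).flatMap (pvRowA l))
      ↔ ∃ i j : Int, 0 ≤ i ∧ i < r ∧ i < j ∧ j < (l.length : Int) ∧ x = pvE l i.toNat j.toNat := by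
  rw [PySem.Set.mem_update]
  simp only [PySem.Set.empty, List.not_mem_nil, false_or, List.mem_flatMap, List.mem_map,
    PySem.List.mem_pyRange_one, pvRowA]
  constructor
  · rintro ⟨i, ⟨h0, hr⟩, j, ⟨hij, hjn⟩, he⟩
    exact ⟨i, j, h0, hr, by omega, hjn, he.symm⟩
  · rintro ⟨i, j, h0, hr, hij, hjn, he⟩
    exact ⟨i, ⟨h0, hr⟩, j, ⟨by omega, hjn⟩, he.symm⟩

theorem pv_rows_eq (l : List Char) (r : Int) (hr : r ≤ (l.length : Int)) :
    PySem.Set.update (PySem.Set.empty) ((PySem.List.pyRange 0 r 1).flatMap (pvRowA l))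
      = PySem.Set.update (PySem.Set.empty) ((PySem.List.pyRange 0 r 1).flatMap (fun i =>
          (((PySem.List.pyRange 0 (l.length : Int) 1).filter (fun j => decide (j ≠ i))).map
            (fun j => if i < j then pvE l i.toNat j.toNat else pvE l j.toNat i.toNat)))) := by
  rcases (by omega : r ≤ 0 ∨ 0 < r) with h0 | h0
  · rw [PySem.List.pyRange_one_eq_nil h0]; rfl
  · have h0' : (0:Int) ≤ r := le_of_lt h0
    clear h0
    revert hr
    induction r, h0' using Int.le_induction with
    | base => intro hr; simp [PySem.List.pyRange_zero]
    | succ m hm ih =>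
      intro hr
      have hmn : m < (l.length : Int) := by omega
      rw [PySem.List.pyRange_one_succ_right hm, List.flatMap_append, List.flatMap_singleton,
          List.flatMap_append, List.flatMap_singleton, pv_update_append, pv_update_append]
      have hIH := ih (by omega)
      rw [← hIH]
      -- now massage row m of B
      have hsplit : PySem.List.pyRange 0 (l.length : Int) 1
          = PySem.List.pyRange 0 m 1 ++ (m :: PySem.List.pyRange (m+1) (l.length : Int) 1) := by
        rw [PySem.List.pyRange_one_append 0 m _ hm (by omega), PySem.List.pyRange_one_cons hmn]
      rw [hsplit, List.filter_append]
      have hfl : (PySem.List.pyRange 0 m 1).filter (fun j => decide (j ≠ m))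
          = PySem.List.pyRange 0 m 1 := by
        rw [List.filter_eq_self]
        intro j hj
        have := PySem.List.mem_pyRange_one.mp hj
        simp; omega
      have hfh : (m :: PySem.List.pyRange (m+1) (l.length : Int) 1).filter (fun j => decide (j ≠ m))
          = PySem.List.pyRange (m+1) (l.length : Int) 1 := by
        rw [List.filter_cons_of_neg (by simp)]
        rw [List.filter_eq_self]
        intro j hj
        have := PySem.List.mem_pyRange_one.mp hj
        simp; omega
      rw [hfl, hfh, List.map_append, pv_update_append]
      have hlow : PySem.Set.update
            (PySem.Set.update PySem.Set.empty ((PySem.List.pyRange 0 m 1).flatMap (pvRowA l)))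
            ((PySem.List.pyRange 0 m 1).map
              (fun j => if m < j then pvE l m.toNat j.toNat else pvE l j.toNat m.toNat))
          = PySem.Set.update PySem.Set.empty ((PySem.List.pyRange 0 m 1).flatMap (pvRowA l)) := by
        apply pv_update_of_mem
        intro x hx
        rw [List.mem_map] at hx
        obtain ⟨j, hj, he⟩ := hx
        have hj' := PySem.List.mem_pyRange_one.mp hj
        rw [if_neg (by omega)] at he
        rw [pv_memSA]
        exact ⟨j, m, hj'.1, hj'.2, hj'.2, hmn, he.symm⟩
      rw [hlow]
      congr 1
      unfold pvRowA
      apply List.map_congr_left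
      intro j hj
      have hj' := PySem.List.mem_pyRange_one.mp hj
      rw [if_pos (by omega)]

theorem pv_A_norm (s : String) :
    two_distance_away s
      = PySem.Set.update (PySem.Set.empty)
          ((PySem.List.pyRange 0 (s.toList.length : Int) 1).flatMap (pvRowA s.toList)) := by
  unfold two_distance_away
  simp only []
  rw [PySem.List.foldl_congr_mem _ _
      (fun two_away i => PySem.Set.update two_away (pvRowA s.toList i)) _ ?_]
  · exact pv_foldl_update _ _ _
  · intro acc i hi
    rw [PySem.List.mem_pyRange_one] at hi
    rw [pv_foldl_add_map]
    unfold pvRowA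
    congr 1
    apply List.map_congr_left
    intro j hj
    rw [PySem.List.mem_pyRange_one] at hj
    exact pv_eA_eq s.toList i j hi.1 (by omega) (by omega)

theorem pv_B_norm (s : String) :
    two_distance_away_alt s
      = PySem.Set.update (PySem.Set.empty)
          ((PySem.List.pyRange 0 (s.toList.length : Int) 1).flatMap (fun i =>
            (((PySem.List.pyRange 0 (s.toList.length : Int) 1).filter (fun j => decide (j ≠ i))).map
              (fun j => if i < j then pvE s.toList i.toNat j.toNat else pvE s.toList j.toNat i.toNat)))) := by
  unfold two_distance_away_alt
  simp only []
  set l := s.toList with hl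
  set n : Int := (l.length : Int) with hn
  rw [PySem.List.enumerate_eq_map_pyRange _ ""]
  rw [List.foldl_map]
  have hlen : PySem.List.len ((PySem.List.pyRange 0 n).map
      (fun i => String.ofList (PySem.List.slice l none (some i) ++ [pvFlip (PySem.List.pyGetD l i ' ')] ++
        PySem.List.slice l (some (i + 1)) none))) = n := by
    simp [PySem.List.len, PySem.List.length_pyRange_one]; omega
  rw [hlen]
  rw [PySem.List.foldl_congr_mem _ _
      (fun two i => PySem.Set.update two
        (((PySem.List.pyRange 0 n 1).filter (fun j => decide (j ≠ i))).map
          (fun j => if i < j then pvE l i.toNat j.toNat else pvE l j.toNat i.toNat))) _ ?_]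
  · exact pv_foldl_update _ _ _
  · intro acc i hi
    rw [PySem.List.mem_pyRange_one] at hi
    rw [PySem.List.pyGetD_map_pyRange_of_nonneg _ n i "" hi.1 hi.2]
    rw [pv_foldl_add_if _ (fun j => j ≠ i)]
    congr 1
    apply List.map_congr_left
    intro j hj
    rw [List.mem_filter] at hj
    have hj2 : j ≠ i := by simpa using hj.2
    have hj1 := PySem.List.mem_pyRange_one.mp hj.1
    exact pv_fB_eq l i j hi.1 hi.2 hj1.1 hj1.2 hj2

-- ===== VERDICT (by name: the statement is the Claim_ definition above) =====
theorem two_distance_away_spec : Claim_equal_two_distance_away := by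
  intro s _
  unfold Spec_two_distance_away
  rw [pv_A_norm, pv_B_norm, pv_rows_eq s.toList (s.toList.length : Int) le_rfl]
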